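-- pv_equiv track=rewrite | github.com/Sepecter/PonyGE2 | src/fitness/cpp_code_gen/differential_testing.py | EAligner
-- ===== SOURCE A (Python) =====
-- def EAligner(e1, e2):
--     # a set of elements to remove from e1
--     rm1 = set()
--     # a set of elements to remove from e2
--     rm2 = set()
--     # step 1. Remove equivalent pairs
--     for a in e1:
--         for b in e2:
--             if a == b:  # check for equivalent pair
--                 rm1.add(a)
--                 rm2.add(b)
--     # step 2. Compute pairs with missing records
--     missing = set()
--     for a in (set(e1) - rm1):
--         missing.add((a, None))  # append with None for missing record
--     for b in (set(e2) - rm2):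
--         missing.add((None, b))  # append with None for missing record
--     return missing
-- ===== SOURCE B (Python) =====
-- def EAligner(e1, e2):
--     s1, s2 = set(e1), set(e2)
--     return {(a, None) for a in s1 - s2} | {(None, b) for b in s2 - s1}
-- ===== Notes on version B (the rewrite author's own statement) =====
-- stated objective: faster
-- what changed: Replaces the quadratic nested equality scan building removal sets with two direct set differences of set(e1) and set(e2).
import Mathlib
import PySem

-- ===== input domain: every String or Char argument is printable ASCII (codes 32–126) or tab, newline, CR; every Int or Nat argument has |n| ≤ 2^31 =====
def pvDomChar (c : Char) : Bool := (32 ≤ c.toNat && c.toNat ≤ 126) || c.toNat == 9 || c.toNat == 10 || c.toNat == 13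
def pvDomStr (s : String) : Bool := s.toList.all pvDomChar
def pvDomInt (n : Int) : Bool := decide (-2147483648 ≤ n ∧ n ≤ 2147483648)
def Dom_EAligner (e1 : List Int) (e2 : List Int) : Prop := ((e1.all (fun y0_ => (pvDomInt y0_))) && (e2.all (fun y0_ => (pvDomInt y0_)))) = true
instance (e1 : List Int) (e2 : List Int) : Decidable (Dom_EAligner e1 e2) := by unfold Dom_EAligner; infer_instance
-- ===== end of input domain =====

-- B replaces A's quadratic nested equality scan with two direct set differences; the returned set is identical.

-- ===== PORT A =====
def EAligner (e1 : List Int) (e2 : List Int) : List (Option Int × Option Int) :=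
  -- rm1, rm2: sets of elements to remove, filled by the nested loop over e1 × e2
  let rms : PySem.Set Int × PySem.Set Int :=
    e1.foldl (fun rm a =>
        e2.foldl (fun rm b =>
            if a = b then (PySem.Set.add rm.1 a, PySem.Set.add rm.2 b) else rm) rm)
      (PySem.Set.empty, PySem.Set.empty)
  -- step 2: pairs with missing records
  let m1 : PySem.Set (Option Int × Option Int) :=
    ((PySem.Set.ofList e1).diff rms.1).foldl
      (fun m a => PySem.Set.add m (some a, none)) PySem.Set.empty
  ((PySem.Set.ofList e2).diff rms.2).foldl
      (fun m b => PySem.Set.add m (none, some b)) m1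

-- ===== PORT B =====
def EAligner_alt (e1 : List Int) (e2 : List Int) : List (Option Int × Option Int) :=
  let s1 : PySem.Set Int := PySem.Set.ofList e1
  let s2 : PySem.Set Int := PySem.Set.ofList e2
  PySem.Set.union ((s1.diff s2).map (fun a => (some a, none)))
                  ((s2.diff s1).map (fun b => (none, some b)))

-- ===== PRECONDITION & SPEC =====
def Spec_EAligner (e1 : List Int) (e2 : List Int) (out : List (Option Int × Option Int)) : Prop := out = EAligner_alt e1 e2
instance (e1 : List Int) (e2 : List Int) (out : List (Option Int × Option Int)) : Decidable (Spec_EAligner e1 e2 out) := by unfold Spec_EAligner; infer_instance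

-- ===== CLAIM (what is proved, stated in full; the proofs are below) =====
def Claim_equal_EAligner : Prop := ∀ (e1 : List Int) (e2 : List Int), Dom_EAligner e1 e2 → Spec_EAligner e1 e2 (EAligner e1 e2)

-- ===== LEMMAS AND PROOFS =====

-- folding Set.add over fresh, duplicate-free elements is plain append
theorem foldl_setAdd_eq_append {α : Type} [BEq α] [LawfulBEq α]
    (l s : List α) (h : (s ++ l).Nodup) : l.foldl PySem.Set.add s = s ++ l := by
  induction l generalizing s with
  | nil => simp
  | cons x xs ih =>
    have hx : x ∉ s := fun hmem =>
      (List.disjoint_of_nodup_append h) hmem List.mem_cons_self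
    have hadd : PySem.Set.add s x = s ++ [x] := by
      simp [PySem.Set.add, PySem.Set.contains, hx]
    rw [List.foldl_cons, hadd, ih (s ++ [x]) (by simpa using h), List.append_assoc]
    simp

-- membership in the removal pair after the inner loop over e2
theorem inner_rm_mem (a : Int) (e2 : List Int) (p : PySem.Set Int × PySem.Set Int) (x : Int) :
    (x ∈ (e2.foldl (fun rm b =>
        if a = b then (PySem.Set.add rm.1 a, PySem.Set.add rm.2 b) else rm) p).1
      ↔ x ∈ p.1 ∨ (x = a ∧ a ∈ e2)) ∧
    (x ∈ (e2.foldl (fun rm b =>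
        if a = b then (PySem.Set.add rm.1 a, PySem.Set.add rm.2 b) else rm) p).2
      ↔ x ∈ p.2 ∨ (x = a ∧ a ∈ e2)) := by
  induction e2 generalizing p with
  | nil => simp
  | cons b bs ih =>
    rw [List.foldl_cons]
    by_cases hab : a = b
    · subst hab
      rcases ih (PySem.Set.add p.1 a, PySem.Set.add p.2 a) with ⟨ih1, ih2⟩
      rw [if_pos rfl]
      refine ⟨ih1.trans ?_, ih2.trans ?_⟩ <;>
        · rw [PySem.Set.mem_add]
          simp only [List.mem_cons]
          tauto
    · rcases ih p with ⟨ih1, ih2⟩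
      rw [if_neg hab]
      refine ⟨ih1.trans ?_, ih2.trans ?_⟩ <;>
        · simp only [List.mem_cons]
          tauto

-- membership in the removal pair after the full nested loop
theorem rm_mem (e1 e2 : List Int) (p : PySem.Set Int × PySem.Set Int) (x : Int) :
    (x ∈ (e1.foldl (fun rm a =>
        e2.foldl (fun rm b =>
            if a = b then (PySem.Set.add rm.1 a, PySem.Set.add rm.2 b) else rm) rm) p).1
      ↔ x ∈ p.1 ∨ (x ∈ e1 ∧ x ∈ e2)) ∧
    (x ∈ (e1.foldl (fun rm a =>
        e2.foldl (fun rm b =>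
            if a = b then (PySem.Set.add rm.1 a, PySem.Set.add rm.2 b) else rm) rm) p).2
      ↔ x ∈ p.2 ∨ (x ∈ e1 ∧ x ∈ e2)) := by
  induction e1 generalizing p with
  | nil => simp
  | cons a as ih =>
    rw [List.foldl_cons]
    constructor
    · rw [(ih _).1, (inner_rm_mem a e2 p x).1]
      simp only [List.mem_cons]
      constructor
      · rintro ((h | ⟨rfl, h⟩) | ⟨h1, h2⟩) <;> tauto
      · rintro (h | ⟨(rfl | h1), h2⟩) <;> tauto
    · rw [(ih _).2, (inner_rm_mem a e2 p x).2]
      simp only [List.mem_cons]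
      constructor
      · rintro ((h | ⟨rfl, h⟩) | ⟨h1, h2⟩) <;> tauto
      · rintro (h | ⟨(rfl | h1), h2⟩) <;> tauto

-- ===== VERDICT (by name: the statement is the Claim_ definition above) =====
theorem EAligner_spec : Claim_equal_EAligner := by
  intro e1 e2 _
  unfold Spec_EAligner EAligner EAligner_alt
  simp only []
  set rms := e1.foldl (fun rm a =>
        e2.foldl (fun rm b =>
            if a = b then (PySem.Set.add rm.1 a, PySem.Set.add rm.2 b) else rm) rm)
      ((PySem.Set.empty : PySem.Set Int), (PySem.Set.empty : PySem.Set Int)) with hrms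
  -- the removal sets have the same members as the other input list (within each list)
  have hd1 : (PySem.Set.ofList e1).diff rms.1 = (PySem.Set.ofList e1).diff (PySem.Set.ofList e2) := by
    simp only [PySem.Set.diff]
    apply List.filter_congr
    intro x hx
    have hx1 : x ∈ e1 := (PySem.Set.mem_ofList e1 x).mp hx
    have hm : x ∈ rms.1 ↔ x ∈ PySem.Set.ofList e2 := by
      rw [(rm_mem e1 e2 _ x).1, PySem.Set.mem_ofList]
      simp [PySem.Set.empty, hx1]
    simp only [PySem.Set.contains]
    congr 1
    simp only [List.contains_eq_mem]
    exact decide_eq_decide.mpr hm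
  have hd2 : (PySem.Set.ofList e2).diff rms.2 = (PySem.Set.ofList e2).diff (PySem.Set.ofList e1) := by
    simp only [PySem.Set.diff]
    apply List.filter_congr
    intro x hx
    have hx2 : x ∈ e2 := (PySem.Set.mem_ofList e2 x).mp hx
    have hm : x ∈ rms.2 ↔ x ∈ PySem.Set.ofList e1 := by
      rw [(rm_mem e1 e2 _ x).2, PySem.Set.mem_ofList]
      simp [PySem.Set.empty, hx2]
    simp only [PySem.Set.contains]
    congr 1
    simp only [List.contains_eq_mem]
    exact decide_eq_decide.mpr hm
  set d1 := (PySem.Set.ofList e1).diff (PySem.Set.ofList e2) with hdd1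
  set d2 := (PySem.Set.ofList e2).diff (PySem.Set.ofList e1) with hdd2
  have hn1 : (d1.map (fun a => ((some a : Option Int), (none : Option Int)))).Nodup := by
    apply List.Nodup.map
    · intro x y hxy; simpa using hxy
    · exact (PySem.Set.nodup_ofList e1).filter _
  have hn2 : (d2.map (fun b => ((none : Option Int), (some b : Option Int)))).Nodup := by
    apply List.Nodup.map
    · intro x y hxy; simpa using hxy
    · exact (PySem.Set.nodup_ofList e2).filter _
  have hdisj : ∀ x ∈ d1.map (fun a => ((some a : Option Int), (none : Option Int))),
      ∀ y ∈ d2.map (fun b => ((none : Option Int), (some b : Option Int))), x ≠ y := by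
    intro x hx y hy
    rcases List.mem_map.mp hx with ⟨a, _, rfl⟩
    rcases List.mem_map.mp hy with ⟨b, _, rfl⟩
    simp
  have happ : (d1.map (fun a => ((some a : Option Int), (none : Option Int))) ++
      d2.map (fun b => ((none : Option Int), (some b : Option Int)))).Nodup := by
    rw [List.nodup_append]
    exact ⟨hn1, hn2, by
      intro x hx y hy
      exact hdisj x hx y hy⟩
  -- evaluate A's two accumulation loops as appends
  have hA1 : d1.foldl (fun m a => PySem.Set.add m (some a, none)) PySem.Set.empty
      = d1.map (fun a => ((some a : Option Int), (none : Option Int))) := by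
    rw [← List.foldl_map]
    have := foldl_setAdd_eq_append
      (d1.map (fun a => ((some a : Option Int), (none : Option Int)))) [] (by simpa using hn1)
    simpa [PySem.Set.empty] using this
  have hA2 : d2.foldl (fun m b => PySem.Set.add m (none, some b))
        (d1.map (fun a => ((some a : Option Int), (none : Option Int))))
      = d1.map (fun a => ((some a : Option Int), (none : Option Int))) ++
        d2.map (fun b => ((none : Option Int), (some b : Option Int))) := by
    rw [← List.foldl_map]
    exact foldl_setAdd_eq_append _ _ happ
  -- evaluate B's union as append
  have hB : PySem.Set.union (d1.map (fun a => ((some a : Option Int), (none : Option Int))))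
        (d2.map (fun b => ((none : Option Int), (some b : Option Int))))
      = d1.map (fun a => ((some a : Option Int), (none : Option Int))) ++
        d2.map (fun b => ((none : Option Int), (some b : Option Int))) := by
    simp only [PySem.Set.union, PySem.Set.update]
    exact foldl_setAdd_eq_append _ _ happ
  rw [hd1, hd2, hA1, hA2, hB]
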